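-- pv_equiv track=rewrite | github.com/WeiYi95/TAD_DP | Cutter_Eraser.py | truncatePoins
-- ===== SOURCE A (Python) =====
-- def truncatePoins(points, dis=1):
--     poi = []
--     st = points[0]
--     fin = -1
--     for i in range(1, len(points)):
--         if points[i] != st + dis:
--             if fin == -1:
--                 poi.append(st)
--             else:
--                 poi.append((fin + st) // 2)
--             st = points[i]
--             fin = -1
--             continue
--         fin = points[i]
--     poi.append(points[-1])
--     return poi
-- ===== SOURCE B (Python) =====
-- def truncatePoins(points, dis=1):
--     # Run-skipping index walk: for each run start, jump over the whole block of
--     # followers equal to start+dis with an inner scan, then emit the run's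
--     # representative; points[-1] is appended unconditionally as in the original.
--     out = []
--     i, n = 0, len(points)
--     while i < n:
--         start = points[i]
--         j = i + 1
--         while j < n and points[j] == start + dis:
--             j += 1
--         if j < n:
--             out.append(start if j == i + 1 else (2 * start + dis) // 2)
--         i = j
--     out.append(points[-1])
--     return out
-- ===== Notes on version B (the rewrite author's own statement) =====
-- stated objective: alternative
-- what changed: Replaces A's single element-by-element scan with mutable st/fin state and a -1 sentinel by a run-skipping index walk: an outer loop over run starts whose inner loop jumps over the entire block of followers equal to start+dis, emitting start or the floor midpoint (2*start+dis)//2 per run.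
-- intended difference: On inputs where a run start equal to -1-dis is immediately followed by the follower value -1 and that run is later closed (and dis//2 is nonzero), A's fin=-1 'no follower seen' sentinel collides with the genuine follower value -1 and A emits the run's start, while B emits the intended floor midpoint of the run; the midpoint is the intended value because -1 there is a real follower, not the sentinel. — e.g. on truncatePoins([-3, -1, 0], 2): A returns [-3, 0], B returns [-2, 0]
import Mathlib
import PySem

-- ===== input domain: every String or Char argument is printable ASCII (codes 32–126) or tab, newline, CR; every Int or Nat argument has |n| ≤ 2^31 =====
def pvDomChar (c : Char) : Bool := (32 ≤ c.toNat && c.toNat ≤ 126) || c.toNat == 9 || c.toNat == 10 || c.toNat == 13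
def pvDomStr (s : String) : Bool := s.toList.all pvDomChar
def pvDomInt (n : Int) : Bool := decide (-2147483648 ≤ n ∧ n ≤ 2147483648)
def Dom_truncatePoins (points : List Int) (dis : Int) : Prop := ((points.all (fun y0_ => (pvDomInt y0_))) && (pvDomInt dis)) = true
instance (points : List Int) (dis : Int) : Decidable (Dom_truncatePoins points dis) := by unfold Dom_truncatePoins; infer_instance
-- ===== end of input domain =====

-- B replaces A's single element-by-element scan (mutating st/fin with a -1 sentinel)
-- by a run-skipping index walk: an outer loop over run starts whose inner loop jumps
-- over the whole block of followers equal to start+dis; proved equal outside D_,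
-- where A's fin = -1 sentinel collides with a genuine point value -1.

-- ===== PORT A =====
def truncatePoins (points : List Int) (dis : Int) : List Int :=
  -- poi = []; st = points[0] (IndexError on [] is excluded by Pre_); fin = -1;
  -- then 'for i in range(1, len(points)):' threading the state (poi, st, fin),
  -- and finally poi.append(points[-1]).
  ((PySem.List.pyRange 1 (PySem.List.len points) 1).foldl
      (fun (acc : List Int × Int × Int) (i : Int) =>
        if PySem.List.pyGetD points i 0 ≠ acc.2.1 + dis then
          (acc.1 ++ [if acc.2.2 = -1 then acc.2.1
                     else PySem.Int.floordiv (acc.2.2 + acc.2.1) 2],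
           PySem.List.pyGetD points i 0, (-1 : Int))
        else
          (acc.1, acc.2.1, PySem.List.pyGetD points i 0))
      (([] : List Int), PySem.List.pyGetD points 0 0, (-1 : Int))).1
    ++ [PySem.List.pyGetD points (-1) 0]

-- ===== PORT B =====
-- inner 'while j < n and points[j] == start + dis: j += 1' of Source B
def innerB (points : List Int) (n dis start j : Int) : Int :=
  if h : j < n ∧ PySem.List.pyGetD points j 0 = start + dis then
    innerB points n dis start (j + 1)
  else j
termination_by (n - j).toNat
decreasing_by omega

-- termination helper cited by outerB's decreasing_by: the inner while never moves j back
theorem innerB_ge (points : List Int) (n dis start j : Int) : j ≤ innerB points n dis start j := by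
  fun_induction innerB <;> omega

-- outer 'while i < n:' of Source B; Source B's locals start and j are inlined
def outerB (points : List Int) (n dis : Int) (out : List Int) (i : Int) : List Int :=
  if h : i < n then
    outerB points n dis
      (if innerB points n dis (PySem.List.pyGetD points i 0) (i + 1) < n then
         out ++ [if innerB points n dis (PySem.List.pyGetD points i 0) (i + 1) = i + 1 then
                   PySem.List.pyGetD points i 0
                 else PySem.Int.floordiv (2 * PySem.List.pyGetD points i 0 + dis) 2]
       else out)
      (innerB points n dis (PySem.List.pyGetD points i 0) (i + 1))
  else out
termination_by (n - i).toNat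
decreasing_by
  have := innerB_ge points n dis (PySem.List.pyGetD points i 0) (i + 1)
  omega

def truncatePoins_alt (points : List Int) (dis : Int) : List Int :=
  outerB points (PySem.List.len points) dis [] 0 ++ [PySem.List.pyGetD points (-1) 0]

-- ===== PRECONDITION & SPEC =====
-- Python A raises IndexError on the empty list (points[0]); excluded.
def Pre_truncatePoins (points : List Int) (dis : Int) : Prop := points ≠ []
instance (points : List Int) (dis : Int) : Decidable (Pre_truncatePoins points dis) := by
  unfold Pre_truncatePoins; infer_instance
def pvWitness_truncatePoins : List Int × Int := ([0], 1)

-- The exact collision pattern in the input: a run start s = -1-d whose first follower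
-- is -1, with a non-(-1) element somewhere later (closing the run).  collStep only
-- inspects the input (it walks the run structure); it computes no output.
def collStep (d s : Int) : List Int → Bool
  | [] => false
  | p :: l =>
    if p ≠ s + d then collStep d p l
    else if s + d = -1 then l.any (fun x => x != -1) else collStep d s l

-- On inputs where a run start equal to -1-dis is immediately followed by -1 and that
-- run is later closed (and dis//2 ≠ 0), A's fin = -1 "no follower seen" sentinel
-- collides with the genuine follower value -1, so A returns the run's start where
-- B returns the intended floor midpoint.
def D_truncatePoins (points : List Int) (dis : Int) : Prop :=
  PySem.Int.floordiv dis 2 ≠ 0 ∧ collStep dis (points.headD 0) points.tail = true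
instance (points : List Int) (dis : Int) : Decidable (D_truncatePoins points dis) := by
  unfold D_truncatePoins; infer_instance

def Spec_truncatePoins (points : List Int) (dis : Int) (out : List Int) : Prop :=
  ¬ D_truncatePoins points dis → out = truncatePoins_alt points dis
instance (points : List Int) (dis : Int) (out : List Int) : Decidable (Spec_truncatePoins points dis out) := by
  unfold Spec_truncatePoins; infer_instance

def pvDiffWitness_truncatePoins : List Int × Int := ([-3, -1, 0], 2)
def pvDiffWitnessOut_truncatePoins : (List Int) × (List Int) := ([-3, 0], [-2, 0])

-- ===== CLAIM (what is proved, stated in full; the proofs are below) =====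
def Claim_unchanged_truncatePoins : Prop := ∀ (points : List Int) (dis : Int), Dom_truncatePoins points dis → Pre_truncatePoins points dis → Spec_truncatePoins points dis (truncatePoins points dis)
def Claim_changed_truncatePoins : Prop := Dom_truncatePoins (pvDiffWitness_truncatePoins.1) (pvDiffWitness_truncatePoins.2) ∧ Pre_truncatePoins (pvDiffWitness_truncatePoins.1) (pvDiffWitness_truncatePoins.2) ∧ D_truncatePoins (pvDiffWitness_truncatePoins.1) (pvDiffWitness_truncatePoins.2) ∧ truncatePoins (pvDiffWitness_truncatePoins.1) (pvDiffWitness_truncatePoins.2) = pvDiffWitnessOut_truncatePoins.1 ∧ truncatePoins_alt (pvDiffWitness_truncatePoins.1) (pvDiffWitness_truncatePoins.2) = pvDiffWitnessOut_truncatePoins.2 ∧ pvDiffWitnessOut_truncatePoins.1 ≠ pvDiffWitnessOut_truncatePoins.2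
def Claim_exact_truncatePoins : Prop := ∀ (points : List Int) (dis : Int), Dom_truncatePoins points dis → Pre_truncatePoins points dis → D_truncatePoins points dis → truncatePoins points dis ≠ truncatePoins_alt points dis

-- ===== LEMMAS AND PROOFS =====

-- A's closed-group emissions, as a structural recursion over the tail of the list.
def scanA (dis st fin : Int) : List Int → List Int
  | [] => []
  | p :: rest =>
    if p = st + dis then scanA dis st p rest
    else (if fin = -1 then st else PySem.Int.floordiv (fin + st) 2) :: scanA dis p (-1) rest

-- B's runs as completed (start, length) groups (proof intermediate).
def scanB (dis st len : Int) : List Int → List (Int × Int)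
  | [] => []
  | p :: rest =>
    if p = st + dis then scanB dis st (len + 1) rest
    else (st, len) :: scanB dis p 1 rest

def fB (dis : Int) (g : Int × Int) : Int :=
  if g.2 = 1 then g.1 else PySem.Int.floordiv (2 * g.1 + dis) 2

lemma foldA_scan (dis : Int) :
    ∀ (l : List Int) (poi : List Int) (st fin : Int),
      (l.foldl (fun (acc : List Int × Int × Int) (p : Int) =>
          if p ≠ acc.2.1 + dis then
            (acc.1 ++ [if acc.2.2 = -1 then acc.2.1
                       else PySem.Int.floordiv (acc.2.2 + acc.2.1) 2], p, (-1 : Int))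
          else (acc.1, acc.2.1, p)) (poi, st, fin)).1
      = poi ++ scanA dis st fin l := by
  intro l
  induction l with
  | nil => intro poi st fin; simp [scanA]
  | cons p rest ih =>
    intro poi st fin
    simp only [List.foldl_cons]
    by_cases h : p = st + dis
    · rw [if_neg (not_not_intro h), ih, scanA, if_pos h]
    · rw [if_pos h, ih, scanA, if_neg h, List.append_assoc, List.singleton_append]

lemma portA_eq (dis p : Int) (tail : List Int) :
    truncatePoins (p :: tail) dis
      = scanA dis p (-1) tail ++ [PySem.List.pyGetD (p :: tail) (-1) 0] := by
  unfold truncatePoins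
  have key := PySem.List.foldl_pyRange_pyGetD (a := 1) (xs := p :: tail) (d := 0)
    (f := fun (acc : List Int × Int × Int) (q : Int) =>
        if q ≠ acc.2.1 + dis then
          (acc.1 ++ [if acc.2.2 = -1 then acc.2.1
                     else PySem.Int.floordiv (acc.2.2 + acc.2.1) 2], q, (-1 : Int))
        else (acc.1, acc.2.1, q))
    (init := (([] : List Int), PySem.List.pyGetD (p :: tail) 0 0, (-1 : Int))) (by norm_num)
  beta_reduce at key
  rw [key]
  simp only [Int.toNat_one, List.drop_one, List.tail_cons, PySem.List.pyGetD_zero_cons]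
  rw [foldA_scan]
  simp

-- ===== B-side characterisation: from the index walk to a run recursion on lists =====

-- list-level mirror of B's outer/inner loops: one recursion step per run
def runsP (dis st : Int) (l : List Int) : List Int :=
  if hk : (l.takeWhile (fun x => x == st + dis)).length < l.length then
    (if (l.takeWhile (fun x => x == st + dis)).length = 0 then st
     else PySem.Int.floordiv (2 * st + dis) 2)
      :: runsP dis (l[(l.takeWhile (fun x => x == st + dis)).length]'hk)
           (l.drop ((l.takeWhile (fun x => x == st + dis)).length + 1))
  else []
termination_by l.length
decreasing_by simp; omega

def runsTop (dis : Int) : List Int → List Int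
  | [] => []
  | y :: rest => runsP dis y rest

lemma innerB_spec (points : List Int) (dis start : Int) :
    ∀ (fuel : Nat) (j : Int), 0 ≤ j → points.length ≤ j.toNat + fuel →
      innerB points (points.length : Int) dis start j
        = j + (((points.drop j.toNat).takeWhile (fun x => x == start + dis)).length : Int) := by
  intro fuel
  induction fuel with
  | zero =>
    intro j hj hf
    rw [innerB, dif_neg (by rintro ⟨hc, _⟩; omega)]
    rw [List.drop_eq_nil_of_le (by omega)]
    simp
  | succ fuel ih =>
    intro j hj hf
    rw [innerB]
    by_cases hjn : j < (points.length : Int)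
    · have hjt : j.toNat < points.length := by omega
      have hget : PySem.List.pyGetD points j 0 = points[j.toNat] :=
        PySem.List.pyGetD_eq_getElem _ _ hj (by simpa using hjn)
      have hdrop : points.drop j.toNat = points[j.toNat] :: points.drop (j.toNat + 1) :=
        List.drop_eq_getElem_cons hjt
      by_cases hm : points[j.toNat] = start + dis
      · rw [dif_pos ⟨hjn, by rw [hget, hm]⟩, ih (j + 1) (by omega) (by omega)]
        rw [show (j + 1).toNat = j.toNat + 1 by omega, hdrop,
          List.takeWhile_cons_of_pos (by simp [hm])]
        simp only [List.length_cons]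
        push_cast
        ring
      · rw [dif_neg (by rintro ⟨_, hc⟩; rw [hget] at hc; exact hm hc)]
        rw [hdrop, List.takeWhile_cons_of_neg (by simp [hm])]
        simp
    · rw [dif_neg (by rintro ⟨hc, _⟩; exact hjn hc)]
      rw [List.drop_eq_nil_of_le (by omega)]
      simp

lemma outerB_spec (points : List Int) (dis : Int) :
    ∀ (fuel : Nat) (i : Int) (out : List Int), 0 ≤ i → points.length ≤ i.toNat + fuel →
      outerB points (points.length : Int) dis out i = out ++ runsTop dis (points.drop i.toNat) := by
  intro fuel
  induction fuel with
  | zero =>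
    intro i out hi hf
    rw [outerB, dif_neg (by omega), List.drop_eq_nil_of_le (by omega)]
    simp [runsTop]
  | succ fuel ih =>
    intro i out hi hf
    rw [outerB]
    by_cases hin : i < (points.length : Int)
    · rw [dif_pos hin]
      have hit : i.toNat < points.length := by omega
      have hget : PySem.List.pyGetD points i 0 = points[i.toNat] :=
        PySem.List.pyGetD_eq_getElem _ _ hi (by simpa using hin)
      have hdrop : points.drop i.toNat = points[i.toNat] :: points.drop (i.toNat + 1) :=
        List.drop_eq_getElem_cons hit
      set x := points[i.toNat] with hx
      set rest := points.drop (i.toNat + 1) with hrest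
      have hrlen : rest.length = points.length - (i.toNat + 1) := by
        simp [hrest]
      have hinner : innerB points (points.length : Int) dis (PySem.List.pyGetD points i 0) (i + 1)
          = (i + 1) + ((rest.takeWhile (fun y => y == x + dis)).length : Int) := by
        rw [hget, innerB_spec points dis x fuel (i + 1) (by omega) (by omega),
          show (i + 1).toNat = i.toNat + 1 by omega]
      set k := (rest.takeWhile (fun y => y == x + dis)).length with hk
      have hkle : k ≤ rest.length := by
        simpa [hk] using (List.takeWhile_sublist (l := rest) (p := fun y => y == x + dis)).length_le
      rw [hinner, ih ((i + 1) + (k : Int))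
        (if (i + 1) + (k : Int) < (points.length : Int) then
           out ++ [if (i + 1) + (k : Int) = i + 1 then PySem.List.pyGetD points i 0
                   else PySem.Int.floordiv (2 * PySem.List.pyGetD points i 0 + dis) 2]
         else out) (by omega) (by omega)]
      have htn : ((i + 1) + (k : Int)).toNat = i.toNat + 1 + k := by omega
      rw [htn]
      have hdropj : points.drop (i.toNat + 1 + k) = rest.drop k := by
        rw [hrest, List.drop_drop]
      rw [hdropj, hdrop]
      show _ = out ++ runsTop dis (x :: rest)
      rw [runsTop, runsP]
      by_cases hkl : k < rest.length
      · rw [dif_pos (by simpa [hk] using hkl)]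
        have hjlt : (i + 1) + (k : Int) < (points.length : Int) := by omega
        rw [if_pos hjlt]
        have hdk : rest.drop k = rest[k] :: rest.drop (k + 1) := List.drop_eq_getElem_cons hkl
        rw [hdk, runsTop]
        have hemit : (if (i + 1) + (k : Int) = i + 1 then PySem.List.pyGetD points i 0
                      else PySem.Int.floordiv (2 * PySem.List.pyGetD points i 0 + dis) 2)
            = (if k = 0 then x else PySem.Int.floordiv (2 * x + dis) 2) := by
          rw [hget]
          by_cases hk0 : k = 0
          · rw [if_pos hk0, if_pos (by omega)]
          · rw [if_neg hk0, if_neg (by omega)]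
        rw [hemit, List.append_assoc, List.singleton_append]
      · have hke : k = rest.length := by omega
        rw [dif_neg (by simpa [hk] using hkl)]
        rw [if_neg (by omega), List.drop_eq_nil_of_le (by omega)]
        simp [runsTop]
    · rw [dif_neg hin, List.drop_eq_nil_of_le (by omega)]
      simp [runsTop]

lemma portB_eq (dis p : Int) (tail : List Int) :
    truncatePoins_alt (p :: tail) dis
      = runsP dis p tail ++ [PySem.List.pyGetD (p :: tail) (-1) 0] := by
  unfold truncatePoins_alt
  rw [PySem.List.len_eq,
    outerB_spec (p :: tail) dis (p :: tail).length 0 [] (by omega) (by omega)]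
  simp [runsTop]

-- runsP on a cons: either start a fresh run or absorb a matching head (runsM = the
-- run already has a second element, so the midpoint is emitted unconditionally)
def runsM (dis st : Int) (l : List Int) : List Int :=
  if hk : (l.takeWhile (fun x => x == st + dis)).length < l.length then
    PySem.Int.floordiv (2 * st + dis) 2
      :: runsP dis (l[(l.takeWhile (fun x => x == st + dis)).length]'hk)
           (l.drop ((l.takeWhile (fun x => x == st + dis)).length + 1))
  else []

lemma runsP_nil (dis st : Int) : runsP dis st [] = [] := by
  rw [runsP]; simp

lemma runsP_cons_neg (dis st p : Int) (rest : List Int) (h : p ≠ st + dis) :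
    runsP dis st (p :: rest) = st :: runsP dis p rest := by
  rw [runsP]
  have ht : ((p :: rest).takeWhile (fun x => x == st + dis)).length = 0 := by
    rw [List.takeWhile_cons_of_neg (by simp [h])]; rfl
  rw [dif_pos (by rw [ht]; simp)]
  simp [ht]

lemma runsP_cons_pos (dis st p : Int) (rest : List Int) (h : p = st + dis) :
    runsP dis st (p :: rest) = runsM dis st rest := by
  rw [runsP, runsM]
  have ht : ((p :: rest).takeWhile (fun x => x == st + dis)).length
      = (rest.takeWhile (fun x => x == st + dis)).length + 1 := by
    rw [List.takeWhile_cons_of_pos (by simp [h])]; rfl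
  set k := (rest.takeWhile (fun x => x == st + dis)).length with hk
  by_cases hkl : k < rest.length
  · rw [dif_pos (by rw [ht]; simpa using hkl), dif_pos hkl]
    simp [ht]
  · rw [dif_neg (by rw [ht]; simpa using hkl), dif_neg hkl]

lemma runsM_nil (dis st : Int) : runsM dis st [] = [] := by
  rw [runsM]; simp

lemma runsM_cons_neg (dis st p : Int) (rest : List Int) (h : p ≠ st + dis) :
    runsM dis st (p :: rest) = PySem.Int.floordiv (2 * st + dis) 2 :: runsP dis p rest := by
  rw [runsM]
  have ht : ((p :: rest).takeWhile (fun x => x == st + dis)).length = 0 := by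
    rw [List.takeWhile_cons_of_neg (by simp [h])]; rfl
  rw [dif_pos (by rw [ht]; simp)]
  simp [ht]

lemma runsM_cons_pos (dis st p : Int) (rest : List Int) (h : p = st + dis) :
    runsM dis st (p :: rest) = runsM dis st rest := by
  rw [runsM, runsM]
  have ht : ((p :: rest).takeWhile (fun x => x == st + dis)).length
      = (rest.takeWhile (fun x => x == st + dis)).length + 1 := by
    rw [List.takeWhile_cons_of_pos (by simp [h])]; rfl
  set k := (rest.takeWhile (fun x => x == st + dis)).length with hk
  by_cases hkl : k < rest.length
  · rw [dif_pos (by rw [ht]; simpa using hkl), dif_pos hkl]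
    simp [ht]
  · rw [dif_neg (by rw [ht]; simpa using hkl), dif_neg hkl]

-- the run recursion computes exactly B's old (start,length)-group view
lemma runsP_scanB (dis : Int) :
    ∀ (l : List Int) (st : Int),
      runsP dis st l = (scanB dis st 1 l).map (fB dis)
      ∧ ∀ c : Int, 2 ≤ c → runsM dis st l = (scanB dis st c l).map (fB dis) := by
  intro l
  induction l with
  | nil => intro st; exact ⟨by simp [runsP_nil, scanB], fun c _ => by simp [runsM_nil, scanB]⟩
  | cons p rest ih =>
    intro st
    constructor
    · by_cases h : p = st + dis
      · rw [runsP_cons_pos dis st p rest h, scanB, if_pos h]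
        exact (ih st).2 2 (by omega)
      · rw [runsP_cons_neg dis st p rest h, scanB, if_neg h, List.map_cons]
        have : fB dis (st, 1) = st := by simp [fB]
        rw [this, (ih p).1]
    · intro c hc
      by_cases h : p = st + dis
      · rw [runsM_cons_pos dis st p rest h, scanB, if_pos h]
        exact (ih st).2 (c + 1) (by omega)
      · rw [runsM_cons_neg dis st p rest h, scanB, if_neg h, List.map_cons]
        have : fB dis (st, c) = PySem.Int.floordiv (2 * st + dis) 2 := by
          simp [fB, show ¬c = 1 by omega]
        rw [this, (ih p).1]

-- ===== A vs B on the group view =====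

lemma mid_eq (st dis : Int) :
    PySem.Int.floordiv (st + dis + st) 2 = st + PySem.Int.floordiv dis 2 := by
  have h : st + dis + st = dis + st * 2 := by ring
  rw [h]
  show (dis + st * 2).fdiv 2 = st + dis.fdiv 2
  rw [Int.add_mul_fdiv_right dis st (by norm_num)]
  ring

lemma mid_eq2 (st dis : Int) :
    PySem.Int.floordiv (2 * st + dis) 2 = st + PySem.Int.floordiv dis 2 := by
  rw [show 2 * st + dis = st + dis + st by ring]
  exact mid_eq st dis

lemma scan_eq_zero (dis : Int) (h0 : PySem.Int.floordiv dis 2 = 0) :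
    ∀ (l : List Int) (st fin len : Int), (fin = -1 ∨ fin = st + dis) →
      scanA dis st fin l = (scanB dis st len l).map (fB dis) := by
  intro l
  induction l with
  | nil => intro st fin len _; simp [scanA, scanB]
  | cons p rest ih =>
    intro st fin len hfin
    by_cases h : p = st + dis
    · simp only [scanA, scanB, if_pos h]
      exact ih st p (len + 1) (Or.inr h)
    · simp only [scanA, scanB, if_neg h, List.map_cons]
      have hfb : fB dis (st, len) = st := by
        simp only [fB, mid_eq2, h0, add_zero, ite_self]
      have hemit : (if fin = -1 then st else PySem.Int.floordiv (fin + st) 2) = fB dis (st, len) := by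
        rw [hfb]
        rcases hfin with hf | hf
        · rw [if_pos hf]
        · subst hf
          by_cases hm : st + dis = -1
          · rw [if_pos hm]
          · rw [if_neg hm, mid_eq, h0, add_zero]
      rw [hemit]
      exact congrArg _ (ih p (-1) 1 (Or.inl rfl))

lemma scan_eq_main (dis : Int) :
    ∀ (l : List Int) (st fin len : Int),
      ((fin = -1 ∧ len = 1 ∧ collStep dis st l = false)
        ∨ (fin = st + dis ∧ st + dis ≠ -1 ∧ 2 ≤ len ∧ collStep dis st l = false)
        ∨ (st + dis = -1 ∧ fin = -1 ∧ 2 ≤ len ∧ ∀ x ∈ l, x = -1)) →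
      scanA dis st fin l = (scanB dis st len l).map (fB dis) := by
  intro l
  induction l with
  | nil => intro st fin len _; simp [scanA, scanB]
  | cons p rest ih =>
    intro st fin len hst
    by_cases h : p = st + dis
    · -- stay inside the current run
      simp only [scanA, scanB, if_pos h]
      rcases hst with ⟨hf, hl, hnp⟩ | ⟨hf, hne, hl, hnp⟩ | ⟨hm, hf, hl, hall⟩
      · rw [collStep, if_neg (not_not_intro h)] at hnp
        by_cases hm : st + dis = -1
        · rw [if_pos hm] at hnp
          refine ih st p (len + 1) (Or.inr (Or.inr ⟨hm, by omega, by omega, ?_⟩))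
          simpa using hnp
        · rw [if_neg hm] at hnp
          exact ih st p (len + 1) (Or.inr (Or.inl ⟨h, hm, by omega, hnp⟩))
      · rw [collStep, if_neg (not_not_intro h), if_neg hne] at hnp
        exact ih st p (len + 1) (Or.inr (Or.inl ⟨h, hne, by omega, hnp⟩))
      · refine ih st p (len + 1) (Or.inr (Or.inr ⟨hm, by omega, by omega, ?_⟩))
        intro x hx; exact hall x (List.mem_cons_of_mem _ hx)
    · -- close the current run
      simp only [scanA, scanB, if_neg h, List.map_cons]
      rcases hst with ⟨hf, hl, hnp⟩ | ⟨hf, hne, hl, hnp⟩ | ⟨hm, hf, hl, hall⟩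
      · rw [collStep, if_pos h] at hnp
        have hemit : (if fin = -1 then st else PySem.Int.floordiv (fin + st) 2) = fB dis (st, len) := by
          simp [hf, hl, fB]
        rw [hemit]
        exact congrArg _ (ih p (-1) 1 (Or.inl ⟨rfl, rfl, hnp⟩))
      · rw [collStep, if_pos h] at hnp
        have hemit : (if fin = -1 then st else PySem.Int.floordiv (fin + st) 2) = fB dis (st, len) := by
          rw [if_neg (show ¬fin = -1 by omega), show fin + st = 2 * st + dis by omega]
          simp only [fB, if_neg (show ¬len = 1 by omega)]
        rw [hemit]
        exact congrArg _ (ih p (-1) 1 (Or.inl ⟨rfl, rfl, hnp⟩))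
      · exact absurd (hall p List.mem_cons_self) (by omega)

lemma scan_ne_main (dis : Int) (h0 : PySem.Int.floordiv dis 2 ≠ 0) :
    ∀ (l : List Int) (st fin len : Int),
      ((fin = -1 ∧ len = 1 ∧ collStep dis st l = true)
        ∨ (fin = st + dis ∧ st + dis ≠ -1 ∧ 2 ≤ len ∧ collStep dis st l = true)
        ∨ (st + dis = -1 ∧ fin = -1 ∧ 2 ≤ len ∧ ∃ x ∈ l, x ≠ -1)) →
      scanA dis st fin l ≠ (scanB dis st len l).map (fB dis) := by
  intro l
  induction l with
  | nil =>
    intro st fin len hst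
    rcases hst with ⟨_, _, hc⟩ | ⟨_, _, _, hc⟩ | ⟨_, _, _, x, hx, _⟩
    · simp [collStep] at hc
    · simp [collStep] at hc
    · exact absurd hx (by simp)
  | cons p rest ih =>
    intro st fin len hst
    by_cases h : p = st + dis
    · -- stay inside the current run
      simp only [scanA, scanB, if_pos h]
      rcases hst with ⟨hf, hl, hc⟩ | ⟨hf, hne, hl, hc⟩ | ⟨hm, hf, hl, hex⟩
      · rw [collStep, if_neg (not_not_intro h)] at hc
        by_cases hm : st + dis = -1
        · rw [if_pos hm] at hc
          refine ih st p (len + 1) (Or.inr (Or.inr ⟨hm, by omega, by omega, ?_⟩))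
          simpa using hc
        · rw [if_neg hm] at hc
          exact ih st p (len + 1) (Or.inr (Or.inl ⟨h, hm, by omega, hc⟩))
      · rw [collStep, if_neg (not_not_intro h), if_neg hne] at hc
        exact ih st p (len + 1) (Or.inr (Or.inl ⟨h, hne, by omega, hc⟩))
      · obtain ⟨x, hx, hxne⟩ := hex
        refine ih st p (len + 1) (Or.inr (Or.inr ⟨hm, by omega, by omega, x, ?_, hxne⟩))
        rcases List.mem_cons.mp hx with hxp | hxr
        · exact absurd (by omega : x = -1) hxne
        · exact hxr
    · -- close the current run
      simp only [scanA, scanB, if_neg h, List.map_cons]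
      rcases hst with ⟨hf, hl, hc⟩ | ⟨hf, hne, hl, hc⟩ | ⟨hm, hf, hl, hex⟩
      · rw [collStep, if_pos h] at hc
        have hemit : (if fin = -1 then st else PySem.Int.floordiv (fin + st) 2) = fB dis (st, len) := by
          simp [hf, hl, fB]
        rw [hemit]
        intro hEq
        injection hEq with _ htail
        exact ih p (-1) 1 (Or.inl ⟨rfl, rfl, hc⟩) htail
      · rw [collStep, if_pos h] at hc
        have hemit : (if fin = -1 then st else PySem.Int.floordiv (fin + st) 2) = fB dis (st, len) := by
          rw [if_neg (show ¬fin = -1 by omega), show fin + st = 2 * st + dis by omega]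
          simp only [fB, if_neg (show ¬len = 1 by omega)]
        rw [hemit]
        intro hEq
        injection hEq with _ htail
        exact ih p (-1) 1 (Or.inl ⟨rfl, rfl, hc⟩) htail
      · -- the collision close: A emits st, B emits the midpoint st + dis//2 ≠ st
        rw [if_pos hf]
        intro hEq
        injection hEq with hhead _
        simp only [fB, mid_eq2, if_neg (show ¬len = 1 by omega)] at hhead
        omega

-- ===== VERDICT (by name: the statement is the Claim_ definition above) =====
theorem truncatePoins_spec : Claim_unchanged_truncatePoins := by
  intro points dis _ hPre
  unfold Spec_truncatePoins
  intro hND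
  cases points with
  | nil => exact absurd rfl hPre
  | cons p tail =>
    rw [portA_eq, portB_eq]
    congr 1
    rw [(runsP_scanB dis tail p).1]
    by_cases h0 : PySem.Int.floordiv dis 2 = 0
    · exact scan_eq_zero dis h0 tail p (-1) 1 (Or.inl rfl)
    · have hNC : collStep dis p tail = false := by
        rcases Bool.eq_false_or_eq_true (collStep dis ((p :: tail).headD 0) (p :: tail).tail) with hb | hb
        · exact absurd ⟨h0, hb⟩ hND
        · simpa using hb
      exact scan_eq_main dis tail p (-1) 1 (Or.inl ⟨rfl, rfl, hNC⟩)

theorem truncatePoins_changed : Claim_changed_truncatePoins := by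
  unfold Claim_changed_truncatePoins
  refine ⟨by decide, by decide, by decide, by decide, ?_, by decide⟩
  show truncatePoins_alt (-3 :: [-1, 0]) 2 = [-2, 0]
  rw [portB_eq 2 (-3) [-1, 0], runsP_cons_pos 2 (-3) (-1) [0] (by norm_num),
    runsM_cons_neg 2 (-3) 0 [] (by norm_num), runsP_nil]
  decide

theorem truncatePoins_tight : Claim_exact_truncatePoins := by
  intro points dis _ hPre hD
  cases points with
  | nil => exact absurd rfl hPre
  | cons p tail =>
    rw [portA_eq, portB_eq, (runsP_scanB dis tail p).1]
    intro hEq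
    have hc : collStep dis p tail = true := by
      have := hD.2; simpa using this
    exact scan_ne_main dis hD.1 tail p (-1) 1 (Or.inl ⟨rfl, rfl, hc⟩)
      (List.append_cancel_right hEq)
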